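-- pv_equiv track=rewrite | github.com/devesch/augin-lambda | objects/Order.py | remove_pendings_from_orders
-- ===== SOURCE A (Python) =====
-- def remove_pendings_from_orders(orders):
--     filtered_orders = []
--     first_incompleted = False
--     if orders:
--         for order in orders:
--             if order["order_status"] != "pending":
--                 filtered_orders.append(order)
--             elif not first_incompleted:
--                 filtered_orders.append(order)
--                 first_incompleted = True
--     return filtered_orders
-- ===== SOURCE B (Python) =====
-- def remove_pendings_from_orders(orders):
--     if not orders:
--         return []
--     try:
--         i = next(i for i, o in enumerate(orders) if o["order_status"] == "pending")
--     except StopIteration: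
--         return list(orders)
--     return orders[:i + 1] + [o for o in orders[i + 1:] if o["order_status"] != "pending"]
-- ===== Notes on version B (the rewrite author's own statement) =====
-- stated objective: alternative
-- what changed: Replaces A's single stateful pass with a boolean flag by locating the index of the first pending order and splicing: the prefix through that index is kept verbatim, and the suffix is filtered to non-pending orders.
import Mathlib
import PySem

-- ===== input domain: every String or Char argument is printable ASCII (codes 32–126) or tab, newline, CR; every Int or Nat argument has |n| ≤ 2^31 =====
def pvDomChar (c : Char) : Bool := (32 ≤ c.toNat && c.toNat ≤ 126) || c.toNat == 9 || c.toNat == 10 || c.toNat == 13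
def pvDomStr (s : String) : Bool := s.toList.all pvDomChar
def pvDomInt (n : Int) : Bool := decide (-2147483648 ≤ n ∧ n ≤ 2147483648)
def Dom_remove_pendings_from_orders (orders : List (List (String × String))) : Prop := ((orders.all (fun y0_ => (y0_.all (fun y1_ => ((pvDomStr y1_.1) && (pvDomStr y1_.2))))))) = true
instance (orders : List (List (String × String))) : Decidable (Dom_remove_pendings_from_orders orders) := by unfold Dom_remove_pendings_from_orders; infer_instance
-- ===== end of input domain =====

-- B replaces A's one stateful pass (boolean flag) with find-first-pending-index + prefix-splice +
-- suffix filter; same cost, different decomposition.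

-- order["order_status"]: first match in the association list; under Pre_ the key is present,
-- so getD never supplies its default (Python would raise KeyError exactly where lookup is none).
def pvStatus (o : List (String × String)) : String :=
  (List.lookup "order_status" o).getD ""

-- ===== PORT A =====
-- the for-loop with its two state variables (accumulator is implicit in the recursion)
def pvGoA (first_incompleted : Bool) : List (List (String × String)) → List (List (String × String))
  | [] => []
  | o :: rest =>
    if pvStatus o ≠ "pending" then o :: pvGoA first_incompleted rest
    else if first_incompleted = false then o :: pvGoA true rest
    else pvGoA first_incompleted rest

def remove_pendings_from_orders (orders : List (List (String × String))) : List (List (String × String)) :=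
  if orders = [] then [] else pvGoA false orders

-- ===== PORT B =====
def remove_pendings_from_orders_alt (orders : List (List (String × String))) : List (List (String × String)) :=
  if orders = [] then []
  else
    match (PySem.List.enumerate orders 0).find? (fun p => pvStatus p.2 == "pending") with
    | none => orders
    | some (i, _) =>
        PySem.List.slice orders none (some (i + 1)) ++
          (PySem.List.slice orders (some (i + 1)) none).filter (fun o => pvStatus o != "pending")

-- ===== PRECONDITION & SPEC =====
-- Pre_ excludes exactly the inputs containing an order without an "order_status" key, on which A raises KeyError.
def Pre_remove_pendings_from_orders (orders : List (List (String × String))) : Prop :=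
  ∀ o ∈ orders, (List.lookup "order_status" o).isSome = true
instance (orders : List (List (String × String))) : Decidable (Pre_remove_pendings_from_orders orders) := by unfold Pre_remove_pendings_from_orders; infer_instance

def pvWitness_remove_pendings_from_orders : (List (List (String × String))) :=
  [[("order_status", "done")], [("order_status", "pending")], [("order_status", "pending")]]

def Spec_remove_pendings_from_orders (orders : List (List (String × String))) (out : List (List (String × String))) : Prop := out = remove_pendings_from_orders_alt orders
instance (orders : List (List (String × String))) (out : List (List (String × String))) : Decidable (Spec_remove_pendings_from_orders orders out) := by unfold Spec_remove_pendings_from_orders; infer_instance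

-- ===== CLAIM (what is proved, stated in full; the proofs are below) =====
def Claim_equal_remove_pendings_from_orders : Prop := ∀ (orders : List (List (String × String))), Dom_remove_pendings_from_orders orders → Pre_remove_pendings_from_orders orders → Spec_remove_pendings_from_orders orders (remove_pendings_from_orders orders)

-- ===== LEMMAS AND PROOFS =====

-- A's loop after the flag is set keeps exactly the non-pending orders
theorem pvGoA_true (l : List (List (String × String))) :
    pvGoA true l = l.filter (fun o => pvStatus o != "pending") := by
  induction l with
  | nil => rfl
  | cons o rest ih =>
    by_cases h : pvStatus o = "pending" <;> simp [pvGoA, h, ih]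

-- find? over enumerate started at s is the start-0 result with the index shifted by s
theorem pvFind_enum_shift (q : List (String × String) → Bool)
    (l : List (List (String × String))) (s : Int) :
    (PySem.List.enumerate l s).find? (fun p => q p.2)
      = ((PySem.List.enumerate l 0).find? (fun p => q p.2)).map (fun p => (p.1 + s, p.2)) := by
  induction l generalizing s with
  | nil => simp [PySem.List.enumerate_nil]
  | cons o rest ih =>
    by_cases h : q o = true
    · simp [PySem.List.enumerate_cons, h]
    · simp only [PySem.List.enumerate_cons, List.find?_cons, h]
      rw [show (0:Int)+1 = 1 by norm_num, ih (s + 1), ih 1, Option.map_map]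
      cases (PySem.List.enumerate rest 0).find? (fun p => q p.2) with
      | none => simp
      | some p => simp; ring

-- every index produced by enumerate _ 0 is a natural number
theorem pvFind_enum_nat (q : List (String × String) → Bool)
    (l : List (List (String × String))) (i : Int) (o : List (String × String))
    (h : (PySem.List.enumerate l 0).find? (fun p => q p.2) = some (i, o)) :
    ∃ k : Nat, i = (k : Int) := by
  have hmem := List.mem_of_find?_eq_some h
  rw [PySem.List.mem_enumerate_iff] at hmem
  obtain ⟨k, hk, hp⟩ := hmem
  exact ⟨k, by simp at hp; omega⟩

-- B equals A's loop run with the flag still unset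
theorem pvAlt_eq_goA (orders : List (List (String × String))) :
    remove_pendings_from_orders_alt orders = pvGoA false orders := by
  induction orders with
  | nil => rfl
  | cons o rest ih =>
    by_cases h : pvStatus o = "pending"
    · -- head is the first pending order: take 1 ++ filter of the tail
      simp only [remove_pendings_from_orders_alt, PySem.List.enumerate_cons, List.find?_cons, h,
        beq_self_eq_true, reduceCtorEq, if_neg, not_false_eq_true]
      have h1 : (0 : Int) + 1 = ((1 : Nat) : Int) := by norm_num
      rw [h1, PySem.List.slice_to_natCast, PySem.List.slice_from_natCast]
      simp [pvGoA, h, pvGoA_true]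
    · -- head kept verbatim; everything shifts by one
      have hq : (fun p : Int × List (String × String) => pvStatus p.2 == "pending") (0, o) = false := by
        simp [h]
      simp only [remove_pendings_from_orders_alt, reduceCtorEq, if_neg, not_false_eq_true,
        PySem.List.enumerate_cons, List.find?_cons, hq]
      rw [show (0:Int)+1 = 1 by norm_num,
        pvFind_enum_shift (fun o => pvStatus o == "pending") rest 1]
      simp only [pvGoA, h, ne_eq, not_false_eq_true, if_pos]
      cases hf : (PySem.List.enumerate rest 0).find? (fun p => pvStatus p.2 == "pending") with
      | none =>
        -- no pending order anywhere: both sides return the input unchanged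
        rw [← ih]
        simp only [Option.map_none]
        cases rest with
        | nil => rfl
        | cons r rs =>
          simp only [remove_pendings_from_orders_alt, hf, reduceCtorEq, if_neg,
            not_false_eq_true]
      | some p =>
        obtain ⟨i, x⟩ := p
        obtain ⟨k, rfl⟩ := pvFind_enum_nat (fun o => pvStatus o == "pending") rest i x hf
        rw [← ih]
        simp only [Option.map_some]
        have h2 : ((k : Int) + 1 + 1) = (((k + 2 : Nat)) : Int) := by push_cast; ring
        have h3 : ((k : Int) + 1) = (((k + 1 : Nat)) : Int) := by push_cast; ring
        rw [h2, PySem.List.slice_to_natCast, PySem.List.slice_from_natCast]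
        simp only [remove_pendings_from_orders_alt, hf, h3,
          PySem.List.slice_to_natCast, PySem.List.slice_from_natCast]
        cases rest with
        | nil => simp [PySem.List.enumerate_nil] at hf
        | cons r rs => simp [List.take_succ_cons, List.drop_succ_cons]

-- ===== VERDICT (by name: the statement is the Claim_ definition above) =====
theorem remove_pendings_from_orders_spec : Claim_equal_remove_pendings_from_orders := by
  intro orders _ _
  unfold Spec_remove_pendings_from_orders remove_pendings_from_orders
  rw [pvAlt_eq_goA]
  cases orders <;> simp [pvGoA]
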